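-- pv_equiv track=rewrite | github.com/ducthach1401/Hackerrank | Python/16.py | stringSimilarity
-- ===== SOURCE A (Python) =====
-- def stringSimilarity(s):
--     result = int(len(s))
--     s1 = s
--     while len(s) != 0:
--         s = s[1:]
--         for i in range(len(s)):
--             if s[i] == s1[i]:
--                 result = result + 1
--             else:
--                 break
--     return result
-- ===== SOURCE B (Python) =====
-- def stringSimilarity(s):
--     # Level-by-level: live = suffix start positions whose match with the prefix
--     # has survived k characters; each round extends every live match by one character.
--     n = len(s)
--     live = list(range(n))
--     k = 0
--     total = 0
--     while live:
--         live = [i for i in live if i + k < n and s[i + k] == s[k]]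
--         total += len(live)
--         k += 1
--     return total
-- ===== Notes on version B (the rewrite author's own statement) =====
-- stated objective: alternative
-- what changed: A scans each suffix separately against the prefix, re-slicing the string every round; B makes one level-by-level pass keeping the list of suffix start positions whose match with the prefix is still alive and extending them all by one character per round.
import Mathlib
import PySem

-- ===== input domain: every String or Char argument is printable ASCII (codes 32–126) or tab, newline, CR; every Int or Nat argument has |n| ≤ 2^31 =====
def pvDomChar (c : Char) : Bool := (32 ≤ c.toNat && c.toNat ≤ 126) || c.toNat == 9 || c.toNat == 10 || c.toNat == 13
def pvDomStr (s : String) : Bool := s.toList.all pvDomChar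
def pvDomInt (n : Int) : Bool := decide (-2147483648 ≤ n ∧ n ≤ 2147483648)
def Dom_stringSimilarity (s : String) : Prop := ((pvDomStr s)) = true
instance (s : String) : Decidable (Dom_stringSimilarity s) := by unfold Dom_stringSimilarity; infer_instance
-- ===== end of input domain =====

-- B replaces A's per-suffix rescans (and per-iteration slice copies) by one level-by-level
-- pass over the suffix start positions whose match with the prefix is still alive.

-- ===== PORT A =====
-- inner 'for i in range(len(s)): if s[i] == s1[i]: result += 1 else: break'.
-- s1[i] ported with pyGet?; the 'none' (IndexError) arm is unreachable in A's calls
-- since s is always a proper suffix of s1 (i < len s ≤ len s1).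
def pvAInner (s s1 : List Char) (i : Nat) (result : Int) : Int :=
  if h : i < s.length then
    match PySem.List.pyGet? s1 (i : Int) with
    | some c => if s[i] == c then pvAInner s s1 (i + 1) (result + 1) else result
    | none => result
  else result
termination_by s.length - i

-- outer 'while len(s) != 0: s = s[1:]; <inner loop>'
def pvAOuter (s s1 : List Char) (result : Int) : Int :=
  match s with
  | [] => result
  | _ :: t => pvAOuter t s1 (pvAInner t s1 0 result)

def stringSimilarity (s : String) : Int :=
  pvAOuter s.toList s.toList (s.toList.length : Int)

-- ===== PORT B =====
-- '[i for i in live if i + k < n and s[i + k] == s[k]]' (the 'and' short-circuits: s[k] is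
-- only read when i + k < n, which forces k < n, so getD never pads — exact)
def pvBFilter (l : List Char) (n k : Nat) (live : List Nat) : List Nat :=
  live.filter (fun i => decide (i + k < n) && (l.getD (i + k) ' ' == l.getD k ' '))

-- 'while live: live = [...]; total += len(live); k += 1'; fuel n+1 provably suffices
-- (after n rounds no position can extend, so live is empty)
def pvBLoop (l : List Char) (n : Nat) : Nat → List Nat → Nat → Int → Int
  | 0, _, _, total => total
  | fuel + 1, live, k, total =>
    if live.isEmpty then total
    else
      let live' := pvBFilter l n k live
      pvBLoop l n fuel live' (k + 1) (total + (live'.length : Int))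

def stringSimilarity_alt (s : String) : Int :=
  let l := s.toList
  let n := l.length
  pvBLoop l n (n + 1) (List.range n) 0 0

-- ===== PRECONDITION & SPEC =====
def Spec_stringSimilarity (s : String) (out : Int) : Prop := out = stringSimilarity_alt s
instance (s : String) (out : Int) : Decidable (Spec_stringSimilarity s out) := by unfold Spec_stringSimilarity; infer_instance

-- ===== CLAIM (what is proved, stated in full; the proofs are below) =====
def Claim_equal_stringSimilarity : Prop := ∀ (s : String), Dom_stringSimilarity s → Spec_stringSimilarity s (stringSimilarity s)

-- ===== LEMMAS AND PROOFS =====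

-- common specification: length of the longest common prefix of two lists
def pvLcp : List Char → List Char → Nat
  | a :: as, b :: bs => if a == b then pvLcp as bs + 1 else 0
  | _, _ => 0

theorem pvLcp_le_left (a b : List Char) : pvLcp a b ≤ a.length := by
  induction a generalizing b with
  | nil => cases b <;> simp [pvLcp]
  | cons x as ih =>
    cases b with
    | nil => simp [pvLcp]
    | cons y bs =>
      simp only [pvLcp]
      split
      · have := ih bs; simp; omega
      · simp

theorem pvLcp_self (l : List Char) : pvLcp l l = l.length := by
  induction l with
  | nil => rfl
  | cons x t ih => simp [pvLcp, ih]

theorem pvLcp_succ_iff (a b : List Char) (k : Nat) (d : Char) :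
    k + 1 ≤ pvLcp a b ↔
      (k ≤ pvLcp a b ∧ k < a.length ∧ k < b.length ∧ a.getD k d = b.getD k d) := by
  induction a generalizing b k with
  | nil => cases b <;> simp [pvLcp]
  | cons x as ih =>
    cases b with
    | nil => simp [pvLcp]
    | cons y bs =>
      simp only [pvLcp]
      cases hxy : x == y with
      | true =>
        rw [if_pos rfl]
        cases k with
        | zero =>
          simp only [List.getD_cons_zero]
          constructor
          · intro _; exact ⟨by omega, by simp, by simp, (beq_iff_eq).mp hxy⟩
          · intro _; omega
        | succ k =>
          have hih := ih bs k
          simp only [List.getD_cons_succ, List.length_cons]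
          constructor
          · intro h
            have := hih.mp (by omega)
            exact ⟨by omega, by omega, by omega, this.2.2.2⟩
          · intro ⟨h1, h2, h3, h4⟩
            have := hih.mpr ⟨by omega, by omega, by omega, h4⟩
            omega
      | false =>
        simp only [Bool.false_eq_true, if_false]
        constructor
        · omega
        · intro ⟨h1, h2, h3, h4⟩
          have hk : k = 0 := by omega
          subst hk
          simp only [List.getD_cons_zero] at h4
          exact absurd ((beq_iff_eq).mpr h4) (by simp [hxy])

-- A's inner loop computes r + lcp of the remaining tails
theorem pvAInner_eq (s s1 : List Char) (hlen : s.length ≤ s1.length) :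
    ∀ i r, pvAInner s s1 i r = r + (pvLcp (s.drop i) (s1.drop i) : Int) := by
  intro i
  induction hi : s.length - i using Nat.strong_induction_on generalizing i with
  | _ m ih =>
    intro r
    unfold pvAInner
    by_cases h : i < s.length
    · have h1 : i < s1.length := by omega
      have hget : PySem.List.pyGet? s1 (i : Int) = some s1[i] := by
        rw [PySem.List.pyGet?_natCast, List.getElem?_eq_getElem h1]
      simp only [h, dif_pos, hget]
      have hds : s.drop i = s[i] :: s.drop (i + 1) := List.drop_eq_getElem_cons h
      have hds1 : s1.drop i = s1[i] :: s1.drop (i + 1) := List.drop_eq_getElem_cons h1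
      by_cases heq : s[i] == s1[i]
      · simp only [heq, if_true]
        rw [ih (s.length - (i + 1)) (by omega) (i + 1) rfl]
        rw [hds, hds1]
        simp only [pvLcp, heq, if_true]
        push_cast
        ring
      · simp only [heq]
        rw [hds, hds1]
        simp only [pvLcp, heq]
        simp
    · simp only [h, dif_neg, not_false_iff]
      have hnil : s.drop i = [] := List.drop_eq_nil_of_le (by omega)
      rw [hnil]
      cases s1.drop i <;> simp [pvLcp]

-- proper-suffix sum: pvSpecSum t l = Σ_{j=1}^{len t} lcp (t.drop j) l
def pvSpecSum : List Char → List Char → Nat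
  | [], _ => 0
  | _ :: t, l => pvLcp t l + pvSpecSum t l

theorem pvAOuter_eq (t l : List Char) (hlen : t.length ≤ l.length) (r : Int) :
    pvAOuter t l r = r + (pvSpecSum t l : Int) := by
  induction t generalizing r with
  | nil => simp [pvAOuter, pvSpecSum]
  | cons c t ih =>
    simp only [pvAOuter, pvSpecSum]
    rw [ih (by simp at hlen ⊢; omega)]
    rw [pvAInner_eq t l (by simp at hlen ⊢; omega) 0 r]
    simp only [List.drop_zero]
    push_cast
    ring

theorem pvSpecSum_eq_sum (m l : List Char) :
    pvSpecSum m l = ((List.range m.length).map (fun j => pvLcp (m.drop (j + 1)) l)).sum := by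
  induction m with
  | nil => simp [pvSpecSum]
  | cons c t ih =>
    simp only [pvSpecSum, List.length_cons]
    rw [List.range_succ_eq_map]
    simp only [List.map_cons, List.sum_cons, List.map_map, List.drop_succ_cons, List.drop_zero]
    rw [ih]
    rfl

-- Σ_{i < n} lcp (l.drop i) l = n + pvSpecSum l l
theorem pv_sum_lcpAt (l : List Char) :
    ((List.range l.length).map (fun i => pvLcp (l.drop i) l)).sum
      = l.length + pvSpecSum l l := by
  match l with
  | [] => simp [pvSpecSum]
  | c :: t =>
    have hspec := pvSpecSum_eq_sum (c :: t) (c :: t)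
    rw [List.length_cons, List.range_succ] at hspec
    simp only [List.map_append, List.sum_append, List.map_cons, List.map_nil, List.sum_cons,
      List.sum_nil] at hspec
    rw [show (c :: t).drop (t.length + 1) = [] from List.drop_eq_nil_of_le (by simp)] at hspec
    simp only [pvLcp] at hspec
    rw [List.length_cons, List.range_succ_eq_map]
    simp only [List.map_cons, List.sum_cons, List.map_map, List.drop_zero]
    rw [pvLcp_self]
    have hmap : (List.map ((fun i => pvLcp ((c :: t).drop i) (c :: t)) ∘ Nat.succ) (List.range t.length))
        = List.map (fun j => pvLcp ((c :: t).drop (j + 1)) (c :: t)) (List.range t.length) := by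
      apply List.map_congr_left
      intro j _
      simp [Function.comp]
    rw [hmap]
    simp only [Nat.add_zero] at hspec
    simp only [List.length_cons]
    omega

-- counting: Σ_{j∈[1,n]} (1 if j ≤ v else 0) = min v n
theorem pv_sum_indicator (n v : Nat) :
    ((List.range' 1 n).map (fun j => if j ≤ v then 1 else 0)).sum = min v n := by
  induction n with
  | zero => simp
  | succ n ih =>
    rw [List.range'_1_concat]
    simp only [List.map_append, List.sum_append, List.map_cons, List.map_nil, List.sum_cons,
      List.sum_nil]
    rw [ih]
    by_cases h : 1 + n ≤ v <;> simp [h] <;> omega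

-- double counting: Σ_{j∈[1,n]} #{v ∈ fs : j ≤ v} = Σ fs, when every v ≤ n
theorem pv_double_count (n : Nat) (fs : List Nat) (hb : ∀ v ∈ fs, v ≤ n) :
    ((List.range' 1 n).map (fun j => fs.countP (fun v => decide (j ≤ v)))).sum = fs.sum := by
  induction fs with
  | nil =>
    simp only [List.countP_nil, List.sum_nil]
    exact List.sum_eq_zero_iff_forall_eq_nat.mpr (by simp)
  | cons v fs ih =>
    simp only [List.countP_cons, List.sum_cons]
    have hmap : ((List.range' 1 n).map (fun j => fs.countP (fun w => decide (j ≤ w)) +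
        if decide (j ≤ v) = true then 1 else 0)).sum
        = ((List.range' 1 n).map (fun j => fs.countP (fun w => decide (j ≤ w)))).sum +
          ((List.range' 1 n).map (fun j => if j ≤ v then 1 else 0)).sum := by
      rw [← List.sum_map_add]
      apply congrArg
      apply List.map_congr_left
      intro j _
      simp
    rw [hmap, ih (fun w hw => hb w (List.mem_cons_of_mem _ hw)), pv_sum_indicator]
    have : min v n = v := by have := hb v (List.mem_cons_self); omega
    omega

-- B's filter step advances the live set from level k to level k+1
theorem pvBFilter_step (l : List Char) (k : Nat) :
    pvBFilter l l.length k
        ((List.range l.length).filter (fun i => decide (k ≤ pvLcp (l.drop i) l)))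
      = (List.range l.length).filter (fun i => decide (k + 1 ≤ pvLcp (l.drop i) l)) := by
  unfold pvBFilter
  rw [List.filter_filter]
  apply List.filter_congr
  intro i hi
  have hin : i < l.length := List.mem_range.mp hi
  have hiff := pvLcp_succ_iff (l.drop i) l k ' '
  have hlen : (l.drop i).length = l.length - i := by simp
  have hgd : (l.drop i).getD k ' ' = l.getD (i + k) ' ' := by
    simp only [List.getD]
    rw [List.getElem?_drop]
  rw [Bool.eq_iff_iff]
  simp only [Bool.and_eq_true, decide_eq_true_eq, beq_iff_eq]
  constructor
  · rintro ⟨⟨h1, h2⟩, h3⟩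
    exact hiff.mpr ⟨h3, by omega, by omega, by rw [hgd]; exact h2⟩
  · intro h
    have := hiff.mp h
    refine ⟨⟨by omega, ?_⟩, by omega⟩
    rw [← hgd]; exact this.2.2.2

-- count of positions still alive at level j
def pvCnt (l : List Char) (j : Nat) : Nat :=
  ((List.range l.length).filter (fun i => decide (j ≤ pvLcp (l.drop i) l))).length

-- B's loop accumulates total + Σ_{j=k+1}^{n} cnt j
theorem pvBLoop_eq (l : List Char) :
    ∀ fuel k total, l.length ≤ k + fuel →
      pvBLoop l l.length fuel
          ((List.range l.length).filter (fun i => decide (k ≤ pvLcp (l.drop i) l))) k total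
        = total + ((((List.range' (k + 1) (l.length - k)).map (pvCnt l)).sum : Nat) : Int) := by
  intro fuel
  induction fuel with
  | zero =>
    intro k total hf
    have : l.length - k = 0 := by omega
    simp [pvBLoop, this]
  | succ fuel ih =>
    intro k total hf
    rw [pvBLoop]
    by_cases hemp : ((List.range l.length).filter (fun i => decide (k ≤ pvLcp (l.drop i) l))).isEmpty
    · rw [if_pos hemp]
      rw [List.isEmpty_iff] at hemp
      have hzero : ∀ j ∈ List.range' (k + 1) (l.length - k), pvCnt l j = 0 := by
        intro j hj
        have hjk : k + 1 ≤ j := (List.mem_range'_1.mp hj).1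
        unfold pvCnt
        rw [List.length_eq_zero_iff, List.filter_eq_nil_iff]
        intro i hi hcon
        have hj' : j ≤ pvLcp (l.drop i) l := by simpa using hcon
        have hnk := List.filter_eq_nil_iff.mp hemp i hi
        simp at hnk
        omega
      have hs : ((List.range' (k + 1) (l.length - k)).map (pvCnt l)).sum = 0 := by
        apply List.sum_eq_zero_iff_forall_eq_nat.mpr
        intro x hx
        obtain ⟨j, hj, rfl⟩ := List.mem_map.mp hx
        exact hzero j hj
      simp [hs]
    · rw [if_neg hemp]
      rw [pvBFilter_step]
      rw [ih (k + 1) _ (by omega)]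
      have hcnt : ((List.range l.length).filter
          (fun i => decide (k + 1 ≤ pvLcp (l.drop i) l))).length = pvCnt l (k + 1) := rfl
      rw [hcnt]
      by_cases hk : k < l.length
      · have hsplit : List.range' (k + 1) (l.length - k)
            = (k + 1) :: List.range' (k + 2) (l.length - (k + 1)) := by
          have h1 : l.length - k = (l.length - (k + 1)) + 1 := by omega
          rw [h1, List.range'_succ]
        rw [hsplit]
        simp only [List.map_cons, List.sum_cons]
        push_cast
        ring
      · have h1 : l.length - k = 0 := by omega
        have h2 : l.length - (k + 1) = 0 := by omega
        have h3 : pvCnt l (k + 1) = 0 := by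
          unfold pvCnt
          rw [List.length_eq_zero_iff, List.filter_eq_nil_iff]
          intro i hi hcon
          have hle := pvLcp_le_left (l.drop i) l
          have hdl : (l.drop i).length ≤ l.length := by simp
          simp at hcon
          omega
        simp [h1, h2, h3]

-- the initial live list is level 0
theorem pv_range_eq_filter_zero (l : List Char) :
    List.range l.length
      = (List.range l.length).filter (fun i => decide (0 ≤ pvLcp (l.drop i) l)) := by
  symm
  apply List.filter_eq_self.mpr
  intro i _
  simp

-- ===== VERDICT (by name: the statement is the Claim_ definition above) =====
theorem stringSimilarity_spec : Claim_equal_stringSimilarity := by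
  intro s _
  show stringSimilarity s = stringSimilarity_alt s
  show pvAOuter s.toList s.toList (s.toList.length : Int)
      = pvBLoop s.toList s.toList.length (s.toList.length + 1) (List.range s.toList.length) 0 0
  set l := s.toList with hl
  rw [pvAOuter_eq l l (le_refl _)]
  rw [pv_range_eq_filter_zero l]
  rw [pvBLoop_eq l (l.length + 1) 0 0 (by omega)]
  have hcnt : ∀ j, pvCnt l j
      = ((List.range l.length).map (fun i => pvLcp (l.drop i) l)).countP (fun v => decide (j ≤ v)) := by
    intro j
    unfold pvCnt
    rw [List.countP_map]
    rw [List.countP_eq_length_filter]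
    rfl
  have hdc := pv_double_count l.length ((List.range l.length).map (fun i => pvLcp (l.drop i) l))
    (by
      intro v hv
      obtain ⟨i, _, rfl⟩ := List.mem_map.mp hv
      have h1 := pvLcp_le_left (l.drop i) l
      have h2 : (l.drop i).length ≤ l.length := by simp
      omega)
  have hmapeq : (List.range' (0 + 1) (l.length - 0)).map (pvCnt l)
      = (List.range' 1 l.length).map (fun j =>
          ((List.range l.length).map (fun i => pvLcp (l.drop i) l)).countP (fun v => decide (j ≤ v))) := by
    simp only [Nat.zero_add, Nat.sub_zero]
    apply List.map_congr_left
    intro j _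
    exact hcnt j
  rw [hmapeq, hdc, pv_sum_lcpAt l]
  push_cast
  ring
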